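-- pv_equiv track=rewrite | github.com/yeqown/agentic-house | skills/kibana/scripts/load_kibana_context.py | match_configured_indices
-- ===== SOURCE A (Python) =====
-- def normalize_index_title(title: str) -> str:
--     return title.rstrip("*").strip()
--
-- def match_configured_indices(
--     configured_indices: dict[str, str], metadata: list[dict[str, str]]
-- ) -> dict[str, str | None]:
--     metadata_by_name = {normalize_index_title(item["title"]): item for item in metadata}
--     matched: dict[str, str | None] = {}
--     for index_name in configured_indices:
--         metadata_item = metadata_by_name.get(index_name)
--         matched[index_name] = metadata_item["id"] if metadata_item else None
--     return matched
-- ===== SOURCE B (Python) =====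
-- def normalize_index_title(title: str) -> str:
--     return title.rstrip("*").strip()
--
-- def match_configured_indices(
--     configured_indices: dict[str, str], metadata: list[dict[str, str]]
-- ) -> dict[str, str | None]:
--     matched: dict[str, str | None] = {name: None for name in configured_indices}
--     for item in metadata:
--         name = normalize_index_title(item["title"])
--         if name in matched:
--             matched[name] = item["id"]
--     return matched
-- ===== Notes on version B (the rewrite author's own statement) =====
-- stated objective: simpler
-- what changed: Instead of building a full name->item index over all metadata and then querying it per configured name, B pre-fills the result with {name: None} and makes a single pass over metadata, overwriting matched[name] = item['id'] whenever the normalized title is a configured name (last item wins, as in A).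
import Mathlib
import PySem

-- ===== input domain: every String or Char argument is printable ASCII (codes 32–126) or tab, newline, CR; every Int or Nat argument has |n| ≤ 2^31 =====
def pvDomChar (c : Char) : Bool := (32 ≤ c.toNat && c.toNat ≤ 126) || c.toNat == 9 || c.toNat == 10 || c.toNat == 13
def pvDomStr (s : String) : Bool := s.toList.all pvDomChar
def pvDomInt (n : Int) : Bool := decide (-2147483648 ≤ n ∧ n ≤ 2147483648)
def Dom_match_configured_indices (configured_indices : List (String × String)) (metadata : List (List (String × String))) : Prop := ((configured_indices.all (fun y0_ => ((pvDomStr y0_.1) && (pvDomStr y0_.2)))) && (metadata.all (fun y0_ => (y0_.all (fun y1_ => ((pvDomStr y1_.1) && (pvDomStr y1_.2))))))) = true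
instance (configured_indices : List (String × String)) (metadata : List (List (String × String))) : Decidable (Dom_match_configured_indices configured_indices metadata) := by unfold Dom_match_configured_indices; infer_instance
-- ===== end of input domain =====

set_option maxRecDepth 8192

-- B replaces A's separate name->item index ("build a full index over metadata, then query it per
-- configured name") by pre-filling the result with {name: None} and overwriting during one scan of
-- metadata (objective: simpler decomposition, same cost). Return-value equivalence only.

-- shared helpers (the Python helper normalize_index_title, and the two dict accesses both programs make)
-- title.rstrip("*") ported by hand (PySem has no one-sided strip-with-chars): drop trailing '*'; exact.
def normalizeIndexTitle (title : String) : String :=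
  PySem.Str.strip (String.ofList ((title.toList.reverse.dropWhile (fun c => c == '*')).reverse))

def titleName (item : List (String × String)) : String :=
  normalizeIndexTitle (((PySem.Dict.mk item).get? "title").getD "")

def idOf (item : List (String × String)) : String :=
  ((PySem.Dict.mk item).get? "id").getD ""

-- ===== PORT A =====
def match_configured_indices (configured_indices : List (String × String)) (metadata : List (List (String × String))) : List (String × Option String) :=
  let metadata_by_name : PySem.Dict String (List (String × String)) :=
    metadata.foldl (fun d item => d.insert (titleName item) item) PySem.Dict.empty
  let matched : PySem.Dict String (Option String) :=
    (PySem.Dict.ofList configured_indices).keys.foldl (fun m index_name =>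
      m.insert index_name
        (match metadata_by_name.get? index_name with
         | some metadata_item => if metadata_item = [] then none else some (idOf metadata_item)
         | none => none)) PySem.Dict.empty
  matched.items

-- ===== PORT B =====
def match_configured_indices_alt (configured_indices : List (String × String)) (metadata : List (List (String × String))) : List (String × Option String) :=
  let matched0 : PySem.Dict String (Option String) :=
    (PySem.Dict.ofList configured_indices).keys.foldl (fun m name => m.insert name none) PySem.Dict.empty
  let matched : PySem.Dict String (Option String) :=
    metadata.foldl (fun m item =>
      let name := titleName item
      if m.contains name then m.insert name (some (idOf item)) else m) matched0
  matched.items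

-- ===== PRECONDITION & SPEC =====
-- Pre_ excludes exactly the inputs where one of the Pythons raises KeyError: a metadata item without
-- a "title" key (A and B both raise), or a metadata item whose normalized title is a configured name
-- but which has no "id" key (B raises there; A raises too unless a later duplicate title shadows it —
-- that shadowed-duplicate corner is the only narrowing, see claim.json "cites").
def Pre_match_configured_indices (configured_indices : List (String × String)) (metadata : List (List (String × String))) : Prop :=
  ∀ item ∈ metadata, (PySem.Dict.mk item).contains "title" = true ∧
    (titleName item ∈ (PySem.Dict.ofList configured_indices).keys → (PySem.Dict.mk item).contains "id" = true)
instance (configured_indices : List (String × String)) (metadata : List (List (String × String))) : Decidable (Pre_match_configured_indices configured_indices metadata) := by unfold Pre_match_configured_indices; infer_instance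

def pvWitness_match_configured_indices : (List (String × String)) × (List (List (String × String))) :=
  ([("logs-", "v")], [[("title", "logs-*"), ("id", "abc")], [("title", "other"), ("id", "z")]])

def Spec_match_configured_indices (configured_indices : List (String × String)) (metadata : List (List (String × String))) (out : List (String × Option String)) : Prop := out = match_configured_indices_alt configured_indices metadata
instance (configured_indices : List (String × String)) (metadata : List (List (String × String))) (out : List (String × Option String)) : Decidable (Spec_match_configured_indices configured_indices metadata out) := by unfold Spec_match_configured_indices; infer_instance

-- ===== CLAIM (what is proved, stated in full; the proofs are below) =====
def Claim_equal_match_configured_indices : Prop := ∀ (configured_indices : List (String × String)) (metadata : List (List (String × String))), Dom_match_configured_indices configured_indices metadata → Pre_match_configured_indices configured_indices metadata → Spec_match_configured_indices configured_indices metadata (match_configured_indices configured_indices metadata)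

-- ===== LEMMAS AND PROOFS =====

-- the last metadata item whose normalized title equals `name` (what both programs end up using)
def lastMatch (metadata : List (List (String × String))) (name : String) : Option (List (String × String)) :=
  metadata.reverse.find? (fun it => titleName it == name)

-- B's running value for key `name` with initial value `dflt`
def bVal (metadata : List (List (String × String))) (name : String) (dflt : Option String) : Option String :=
  match lastMatch metadata name with
  | some it => some (idOf it)
  | none => dflt

theorem lastMatch_nil (name : String) : lastMatch [] name = none := rfl

theorem lastMatch_cons (it : List (String × String)) (rest : List (List (String × String))) (name : String) :
    lastMatch (it :: rest) name
      = (lastMatch rest name).or (if titleName it == name then some it else none) := by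
  simp only [lastMatch, List.reverse_cons, List.find?_append]
  cases h : rest.reverse.find? (fun i => titleName i == name) <;>
    cases hp : titleName it == name <;> simp [List.find?, Option.or, hp]

theorem mem_of_lastMatch {metadata : List (List (String × String))} {name : String}
    {it : List (String × String)} (h : lastMatch metadata name = some it) : it ∈ metadata := by
  have := List.mem_of_find?_eq_some h
  simpa using this

theorem bVal_nil (name : String) (dflt : Option String) : bVal [] name dflt = dflt := rfl

theorem bVal_cons (it : List (String × String)) (rest : List (List (String × String)))
    (name : String) (dflt : Option String) :
    bVal (it :: rest) name dflt
      = bVal rest name (if titleName it = name then some (idOf it) else dflt) := by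
  simp only [bVal, lastMatch_cons]
  cases h : lastMatch rest name <;> by_cases hn : titleName it = name <;> simp [Option.or, hn]

-- A's index lookup returns the last matching metadata item
theorem get?_index_eq_lastMatch (metadata : List (List (String × String)))
    (d : PySem.Dict String (List (String × String))) (name : String) :
    (metadata.foldl (fun d item => d.insert (titleName item) item) d).get? name
      = (lastMatch metadata name).or (d.get? name) := by
  induction metadata generalizing d with
  | nil => simp [lastMatch_nil, Option.or]
  | cons it rest ih =>
    simp only [List.foldl_cons, ih, lastMatch_cons]
    rw [PySem.Dict.get?_insert]
    cases h : lastMatch rest name with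
    | some a => simp [Option.or]
    | none =>
      by_cases hn : name = titleName it
      · subst hn; simp [Option.or]
      · have hb : (titleName it == name) = false := by
          simp only [beq_eq_false_iff_ne, ne_eq]
          exact fun e => hn e.symm
        simp [Option.or, hn, hb]

-- B's metadata loop, characterised on the items list
theorem bfold_items (metadata : List (List (String × String)))
    (m : PySem.Dict String (Option String)) :
    (metadata.foldl (fun m item =>
        let name := titleName item
        if m.contains name then m.insert name (some (idOf item)) else m) m).items
      = m.items.map (fun p => (p.1, bVal metadata p.1 p.2)) := by
  induction metadata generalizing m with
  | nil =>
    simp [bVal_nil]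
  | cons it rest ih =>
    simp only [List.foldl_cons]
    by_cases hc : m.contains (titleName it) = true
    · simp only [hc, if_true, ih]
      rw [PySem.Dict.items_insert_of_contains _ _ hc, List.map_map]
      refine List.map_congr_left (fun p _ => ?_)
      by_cases hp : p.1 = titleName it
      · simp [Function.comp, hp, bVal_cons]
      · have hp' : ¬ titleName it = p.1 := fun e => hp e.symm
        simp [Function.comp, hp, hp', bVal_cons]
    · simp only [hc, ih]
      refine List.map_congr_left (fun p hp => ?_)
      have hk : p.1 ∈ m.keys := by
        simp only [PySem.Dict.keys]
        exact List.mem_map_of_mem hp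
      have hne : titleName it ≠ p.1 := by
        intro he
        exact hc ((PySem.Dict.contains_iff_mem_keys _ _).2 (he ▸ hk))
      simp [bVal_cons, hne]

-- ===== VERDICT (by name: the statement is the Claim_ definition above) =====
theorem match_configured_indices_spec : Claim_equal_match_configured_indices := by
  intro configured_indices metadata _hdom hpre
  unfold Spec_match_configured_indices match_configured_indices match_configured_indices_alt
  set K := (PySem.Dict.ofList configured_indices).keys with hK
  -- A's result items
  have hKnd : (K.map (fun n => n)).Nodup := by
    rw [hK, List.map_id']
    exact PySem.Dict.nodup_keys_ofList configured_indices
  have hA := PySem.Dict.items_foldl_insert_fresh (l := K) (k := fun n => n)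
    (v := fun index_name =>
      (match (metadata.foldl (fun d item => d.insert (titleName item) item)
          (PySem.Dict.empty (κ := String) (ν := List (String × String)))).get? index_name with
       | some metadata_item => if metadata_item = [] then none else some (idOf metadata_item)
       | none => none))
    (d := PySem.Dict.empty) (by simp) hKnd
  have hB0 := PySem.Dict.items_foldl_insert_fresh (l := K) (k := fun n => n)
    (v := fun _ => (none : Option String)) (d := PySem.Dict.empty) (by simp) hKnd
  have hemp : (PySem.Dict.empty (κ := String) (ν := Option String)).items = [] := rfl
  rw [hA, bfold_items, hB0, hemp]
  simp only [List.nil_append, List.map_map]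
  refine List.map_congr_left (fun n _ => ?_)
  simp only [Function.comp]
  rw [get?_index_eq_lastMatch]
  cases h : lastMatch metadata n with
  | none => simp [Option.or, bVal, h]
  | some it =>
    have hmem : it ∈ metadata := mem_of_lastMatch h
    have htitle := (hpre it hmem).1
    have hne : it ≠ [] := by
      intro he; subst he; simp [PySem.Dict.contains] at htitle
    simp [Option.or, bVal, h, hne]
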